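-- pv_equiv track=rewrite | github.com/Horsocrates/RegulusAI | regulus/verified/err_validator.py | _cross_check
-- ===== SOURCE A (Python) =====
-- def _cross_check(
--     d1_self_check: dict, formal_violations: list[str]
-- ) -> list[str]:
--     """Cross-check D1's own hierarchy check against formal validation.
--
--     If D1 claims everything is fine but formal check found violations,
--     flag the discrepancy (possible LLM hallucination in self-check).
--     """
--     issues: list[str] = []
--     if not d1_self_check:
--         return issues
--
--     # D1 says "no circular dependencies" but we found one
--     if d1_self_check.get("no_circular_dependencies") and any(
--         "Circular" in v for v in formal_violations
--     ):
--         issues.append(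
--             "DISCREPANCY: D1 claims no circular dependencies, "
--             "but formal check detected a cycle. "
--             "D1's self-check may be hallucinated."
--         )
--
--     # D1 says "elements ground system" but we found orphans
--     if d1_self_check.get("elements_ground_system") and any(
--         "without roles" in v for v in formal_violations
--     ):
--         issues.append(
--             "DISCREPANCY: D1 claims elements ground the system, "
--             "but some elements lack roles. "
--             "L4 (every element needs a role) is violated."
--         )
--
--     return issues
-- ===== SOURCE B (Python) =====
-- def _cross_check(
--     d1_self_check: dict, formal_violations: list[str]
-- ) -> list[str]:
--     """Cross-check D1's own hierarchy check against formal validation.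
--
--     Single pass over formal_violations: classify every violation once into
--     two flags (cycle found / orphan found), stopping early once both kinds
--     have been seen, then emit the discrepancy messages for the flags whose
--     corresponding self-check claim is set.
--     """
--     if not d1_self_check:
--         return []
--     found_cycle = False
--     found_orphan = False
--     for v in formal_violations:
--         if not found_cycle and "Circular" in v:
--             found_cycle = True
--         if not found_orphan and "without roles" in v:
--             found_orphan = True
--         if found_cycle and found_orphan:
--             break
--     issues: list[str] = []
--     if found_cycle and d1_self_check.get("no_circular_dependencies"):
--         issues.append(
--             "DISCREPANCY: D1 claims no circular dependencies, "
--             "but formal check detected a cycle. "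
--             "D1's self-check may be hallucinated."
--         )
--     if found_orphan and d1_self_check.get("elements_ground_system"):
--         issues.append(
--             "DISCREPANCY: D1 claims elements ground the system, "
--             "but some elements lack roles. "
--             "L4 (every element needs a role) is violated."
--         )
--     return issues
-- ===== Notes on version B (the rewrite author's own statement) =====
-- stated objective: alternative
-- what changed: A scans formal_violations once per rule via two independent any(...) generators; B classifies the violations in a single pass with two boolean flags and an early break once both kinds are seen, then emits the messages from the flags.
import Mathlib
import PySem

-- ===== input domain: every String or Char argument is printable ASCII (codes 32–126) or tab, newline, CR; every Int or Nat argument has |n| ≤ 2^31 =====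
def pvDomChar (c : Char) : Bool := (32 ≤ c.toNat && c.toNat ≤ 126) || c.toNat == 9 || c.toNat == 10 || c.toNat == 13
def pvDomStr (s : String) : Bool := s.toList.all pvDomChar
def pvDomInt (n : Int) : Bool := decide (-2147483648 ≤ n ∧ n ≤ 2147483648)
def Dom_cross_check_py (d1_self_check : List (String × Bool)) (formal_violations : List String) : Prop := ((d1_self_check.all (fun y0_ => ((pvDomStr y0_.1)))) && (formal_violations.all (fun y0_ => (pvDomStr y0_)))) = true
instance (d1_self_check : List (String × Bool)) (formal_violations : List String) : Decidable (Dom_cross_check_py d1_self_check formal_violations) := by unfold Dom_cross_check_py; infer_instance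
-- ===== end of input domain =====

-- B replaces A's two independent any(...) scans of formal_violations by a single
-- classifying pass with two boolean flags and an early break (objective: alternative).

-- ===== PORT A =====
-- the two exact message strings
def pvMsgCircular : String :=
  "DISCREPANCY: D1 claims no circular dependencies, but formal check detected a cycle. D1's self-check may be hallucinated."
def pvMsgGround : String :=
  "DISCREPANCY: D1 claims elements ground the system, but some elements lack roles. L4 (every element needs a role) is violated."

def cross_check_py (d1_self_check : List (String × Bool)) (formal_violations : List String) : List String :=
  let issues : List String := []
  if d1_self_check = [] then issues
  else
    let issues :=
      if ((PySem.Dict.ofList d1_self_check).get? "no_circular_dependencies").getD false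
          && formal_violations.any (fun v => PySem.Str.isIn "Circular" v)
      then issues ++ [pvMsgCircular] else issues
    let issues :=
      if ((PySem.Dict.ofList d1_self_check).get? "elements_ground_system").getD false
          && formal_violations.any (fun v => PySem.Str.isIn "without roles" v)
      then issues ++ [pvMsgGround] else issues
    issues

-- ===== PORT B =====
-- the single classifying pass with early break (the `for … break` of Source B)
def pvScanFlags : List String → Bool → Bool → Bool × Bool
  | [], foundCycle, foundOrphan => (foundCycle, foundOrphan)
  | v :: vs, foundCycle, foundOrphan =>
    let foundCycle := if !foundCycle && PySem.Str.isIn "Circular" v then true else foundCycle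
    let foundOrphan := if !foundOrphan && PySem.Str.isIn "without roles" v then true else foundOrphan
    if foundCycle && foundOrphan then (foundCycle, foundOrphan)
    else pvScanFlags vs foundCycle foundOrphan

def cross_check_py_alt (d1_self_check : List (String × Bool)) (formal_violations : List String) : List String :=
  if d1_self_check = [] then []
  else
    let flags := pvScanFlags formal_violations false false
    let issues : List String := []
    let issues :=
      if flags.1 && ((PySem.Dict.ofList d1_self_check).get? "no_circular_dependencies").getD false
      then issues ++ [pvMsgCircular] else issues
    let issues :=
      if flags.2 && ((PySem.Dict.ofList d1_self_check).get? "elements_ground_system").getD false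
      then issues ++ [pvMsgGround] else issues
    issues

-- ===== PRECONDITION & SPEC =====
def Spec_cross_check_py (d1_self_check : List (String × Bool)) (formal_violations : List String) (out : List String) : Prop := out = cross_check_py_alt d1_self_check formal_violations
instance (d1_self_check : List (String × Bool)) (formal_violations : List String) (out : List String) : Decidable (Spec_cross_check_py d1_self_check formal_violations out) := by unfold Spec_cross_check_py; infer_instance

-- ===== CLAIM (what is proved, stated in full; the proofs are below) =====
def Claim_equal_cross_check_py : Prop := ∀ (d1_self_check : List (String × Bool)) (formal_violations : List String), Dom_cross_check_py d1_self_check formal_violations → Spec_cross_check_py d1_self_check formal_violations (cross_check_py d1_self_check formal_violations)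

-- ===== LEMMAS AND PROOFS =====
-- the early-break scan computes exactly the two any-scans of A
theorem pvScanFlags_eq (fv : List String) (c o : Bool) :
    pvScanFlags fv c o =
      (c || fv.any (fun v => PySem.Str.isIn "Circular" v),
       o || fv.any (fun v => PySem.Str.isIn "without roles" v)) := by
  induction fv generalizing c o with
  | nil => simp [pvScanFlags]
  | cons v vs ih =>
    simp only [pvScanFlags, List.any_cons]
    cases c <;> cases o <;>
      cases hc : PySem.Str.isIn "Circular" v <;>
      cases ho : PySem.Str.isIn "without roles" v <;>
      simp [ih]

-- ===== VERDICT (by name: the statement is the Claim_ definition above) =====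
theorem cross_check_py_spec : Claim_equal_cross_check_py := by
  intro d fv _
  unfold Spec_cross_check_py cross_check_py cross_check_py_alt
  by_cases hd : d = []
  · simp [hd]
  · simp only [hd, if_false, pvScanFlags_eq, Bool.false_or, Bool.and_comm]
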